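-- pv_equiv track=rewrite | github.com/adrianoporzia/Universita | secondo_anno/Algoritmi/Modulo_uno/esercizio.py | zero_uno
-- ===== SOURCE A (Python) =====
-- def zero_uno(A):
--     num_z, num_u = 0, 0
--     i = 0
--
--     while i <= len(A) - 1:
--         if A[i] == 1:
--             num_u += 1
--         i += 1
--
--     i, j = 0, len(A) - 1
--     pos = 0
--     while i <= len(A) - 1:
--         if num_u == num_z:
--             pos = i
--         if A[i] == 0:
--             num_z += 1
--         if A[i] == 1:
--             num_u -=1
--         i += 1
--     return pos - 1
-- ===== SOURCE B (Python) =====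
-- def zero_uno(A):
--     n = len(A)
--     pz = [0] * (n + 1)          # pz[i] = count of exact 0s in A[:i]
--     for i in range(n):
--         pz[i + 1] = pz[i] + (1 if A[i] == 0 else 0)
--     so = [0] * (n + 1)          # so[i] = count of exact 1s in A[i:]
--     for i in range(n - 1, -1, -1):
--         so[i] = so[i + 1] + (1 if A[i] == 1 else 0)
--     pos = 0
--     for i in range(n):          # last matching index wins
--         if so[i] == pz[i]:
--             pos = i
--     return pos - 1
-- ===== Notes on version B (the rewrite author's own statement) =====
-- stated objective: alternative
-- what changed: B precomputes two cumulative tables (prefix zero counts and suffix one counts) and then does one simple comparison pass, instead of A's running counters that are incremented/decremented while scanning.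
import Mathlib
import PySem

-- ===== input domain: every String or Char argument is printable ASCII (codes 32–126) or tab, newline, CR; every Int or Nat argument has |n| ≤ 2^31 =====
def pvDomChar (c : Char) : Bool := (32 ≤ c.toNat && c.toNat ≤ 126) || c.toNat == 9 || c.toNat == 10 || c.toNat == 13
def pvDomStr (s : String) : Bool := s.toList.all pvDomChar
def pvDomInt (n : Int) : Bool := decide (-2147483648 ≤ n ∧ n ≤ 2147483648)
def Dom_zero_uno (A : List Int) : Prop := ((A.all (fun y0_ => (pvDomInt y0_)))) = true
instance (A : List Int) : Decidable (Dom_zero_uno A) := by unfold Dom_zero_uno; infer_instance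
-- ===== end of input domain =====

-- ===== PORT A =====
-- B builds prefix/suffix count tables then compares them in one pass; A keeps running counters. Objective: alternative decomposition, same cost.

-- first while loop of A: count the 1s
def pvCountOnes : List Int → Int → Int
  | [], acc => acc
  | x :: xs, acc => pvCountOnes xs (if x = 1 then acc + 1 else acc)

-- second while loop of A: index i, running zero count, running one count, pos
def pvLoopA : List Int → Int → Int → Int → Int → Int
  | [], _, _, _, pos => pos
  | x :: xs, i, num_z, num_u, pos =>
    let pos' := if num_u = num_z then i else pos
    let num_z' := if x = 0 then num_z + 1 else num_z
    let num_u' := if x = 1 then num_u - 1 else num_u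
    pvLoopA xs (i + 1) num_z' num_u' pos'

def zero_uno (A : List Int) : Int :=
  pvLoopA A 0 0 (pvCountOnes A 0) 0 - 1

-- ===== PORT B =====
-- pz table: pvPrefZeros A z = [z, z + zeros in A[:1], …, z + zeros in A]
def pvPrefZeros : List Int → Int → List Int
  | [], z => [z]
  | x :: xs, z => z :: pvPrefZeros xs (z + (if x = 0 then 1 else 0))

-- so table built back-to-front: pvSufOnes A = [ones in A[0:], ones in A[1:], …, 0]
def pvSufOnes : List Int → List Int
  | [] => [0]
  | x :: xs =>
    let r := pvSufOnes xs
    ((if x = 1 then 1 else 0) + r.headI) :: r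

-- final comparison pass of B over the two tables (last match wins)
def pvLoopB : List (Int × Int) → Int → Int → Int
  | [], _, pos => pos
  | (s, z) :: rest, i, pos => pvLoopB rest (i + 1) (if s = z then i else pos)

def zero_uno_alt (A : List Int) : Int :=
  let pz := pvPrefZeros A 0
  let so := pvSufOnes A
  pvLoopB ((so.zip pz).take A.length) 0 0 - 1

-- ===== PRECONDITION & SPEC =====
def Spec_zero_uno (A : List Int) (out : Int) : Prop := out = zero_uno_alt A
instance (A : List Int) (out : Int) : Decidable (Spec_zero_uno A out) := by unfold Spec_zero_uno; infer_instance

-- ===== CLAIM (what is proved, stated in full; the proofs are below) =====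
def Claim_equal_zero_uno : Prop := ∀ (A : List Int), Dom_zero_uno A → Spec_zero_uno A (zero_uno A)

-- ===== LEMMAS AND PROOFS =====

-- ===== VERDICT (by name: the statement is the Claim_ definition above) =====
-- number of exact 1s in a list (proof-side reference)
def pvOnesIn : List Int → Int
  | [] => 0
  | x :: xs => (if x = 1 then 1 else 0) + pvOnesIn xs

theorem pvCountOnes_eq (xs : List Int) : ∀ acc : Int, pvCountOnes xs acc = acc + pvOnesIn xs := by
  induction xs with
  | nil => intro acc; simp [pvCountOnes, pvOnesIn]
  | cons x xs ih =>
    intro acc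
    simp only [pvCountOnes, pvOnesIn, ih]
    split <;> ring

theorem pvSufOnes_headI (xs : List Int) : (pvSufOnes xs).headI = pvOnesIn xs := by
  induction xs with
  | nil => simp [pvSufOnes, pvOnesIn]
  | cons x xs ih => simp [pvSufOnes, pvOnesIn, ih]

theorem pvLoopB_eq_loopA (xs : List Int) :
    ∀ (i z pos : Int),
      pvLoopB (((pvSufOnes xs).zip (pvPrefZeros xs z)).take xs.length) i pos
        = pvLoopA xs i z (pvOnesIn xs) pos := by
  induction xs with
  | nil => intro i z pos; simp [pvSufOnes, pvPrefZeros, pvLoopB, pvLoopA]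
  | cons x xs ih =>
    intro i z pos
    simp only [pvSufOnes, pvPrefZeros, List.zip_cons_cons, List.length_cons,
      List.take_succ_cons, pvLoopB, pvLoopA, pvSufOnes_headI, pvOnesIn]
    have hz : (if x = 0 then z + 1 else z) = z + (if x = 0 then 1 else 0) := by
      split <;> ring
    have hu : (if x = 1 then ((if x = 1 then (1:Int) else 0) + pvOnesIn xs) - 1
               else (if x = 1 then (1:Int) else 0) + pvOnesIn xs) = pvOnesIn xs := by
      split <;> simp_all
    rw [hz, hu, ih]
    rfl


theorem zero_uno_spec : Claim_equal_zero_uno := by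
  intro A _
  show zero_uno A = zero_uno_alt A
  show pvLoopA A 0 0 (pvCountOnes A 0) 0 - 1
      = pvLoopB (((pvSufOnes A).zip (pvPrefZeros A 0)).take A.length) 0 0 - 1
  rw [pvCountOnes_eq, pvLoopB_eq_loopA]
  simp
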